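-- pv_equiv track=rewrite | github.com/michaelbrusegard/NTNU | Algdat/Øving 7/build_decision_tree.py | bruteforce_gen
-- ===== SOURCE A (Python) =====
-- def bruteforce_gen(n, sol={1: set([(0,)])}):
--     if n in sol:
--         return sol[n]
--
--     solutions = set()
--     for x in range(1, n//2 + 1):
--         y = n - x
--         for X in bruteforce_gen(x):
--             for Y in bruteforce_gen(y):
--                 solutions.add(tuple(1+a for a in sorted(X+Y)))
--
--     sol[n] = solutions
--     return solutions
-- ===== SOURCE B (Python) =====
-- def bruteforce_gen(n, sol={1: set([(0,)])}):
--     # Bottom-up DP instead of memoized recursion. Return value matches A;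
--     # side effects differ: A also caches subproblem entries in the default memo,
--     # B writes only key n into the passed/default memo.
--     if n in sol:
--         return sol[n]
--     if n < 1:
--         sol[n] = set()
--         return sol[n]
--     table = {1: {(0,)}}
--     for m in range(2, n + 1):
--         table[m] = {tuple(a + 1 for a in sorted(X + Y))
--                     for x in range(1, m // 2 + 1)
--                     for X in table[x]
--                     for Y in table[m - x]}
--     sol[n] = table[n]
--     return sol[n]
-- ===== Notes on version B (the rewrite author's own statement) =====
-- stated objective: alternative
-- what changed: Replaced A's memoized top-down recursion by an explicit bottom-up dynamic-programming loop that fills a table of solution sets for sizes 2..n in ascending order and returns the final entry.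
import Mathlib
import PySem

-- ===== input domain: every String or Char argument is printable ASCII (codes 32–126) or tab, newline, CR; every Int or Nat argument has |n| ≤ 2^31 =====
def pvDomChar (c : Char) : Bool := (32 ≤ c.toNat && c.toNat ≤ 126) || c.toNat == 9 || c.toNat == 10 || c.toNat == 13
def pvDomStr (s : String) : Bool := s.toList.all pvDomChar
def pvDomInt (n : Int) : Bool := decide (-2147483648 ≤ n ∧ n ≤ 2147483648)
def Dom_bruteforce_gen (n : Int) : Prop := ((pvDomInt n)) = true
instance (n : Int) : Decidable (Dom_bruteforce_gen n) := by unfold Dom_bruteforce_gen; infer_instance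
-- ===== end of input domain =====

-- B replaces A's memoized top-down recursion by an explicit bottom-up table over
-- subproblem sizes 2..n (objective: alternative decomposition, same set of results).
-- Equivalence is about the RETURN value: A also caches subproblem entries in the
-- shared default memo, B writes only the requested key.


-- ===== PORT A =====
-- A's memoized recursion ported as plain recursion (the memo only caches, it never
-- changes the returned value); 'tuple(1+a for a in sorted(X+Y))' is the map over sorted.
def bruteforce_gen (n : Int) : List (List Int) :=
  if n = 1 then [[0]]
  else
    (PySem.List.pyRange 1 (PySem.Int.floordiv n 2 + 1) 1).attach.foldl
      (fun solutions x =>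
        let y := n - x.1
        (bruteforce_gen x.1).foldl
          (fun s X =>
            (bruteforce_gen y).foldl
              (fun s2 Y =>
                PySem.Set.add s2
                  ((PySem.List.sorted (X ++ Y) (fun a => a) false).map (fun a => 1 + a)))
              s)
          solutions)
      PySem.Set.empty
termination_by n.toNat
decreasing_by
  all_goals
    (have hx := PySem.List.mem_pyRange_one.mp x.2
     have hd : PySem.Int.floordiv n 2 = n / 2 :=
       PySem.Int.floordiv_eq_ediv_of_pos (by omega)
     have _h1 : (1 : Int) ≤ x.1 := hx.1
     have _h2 : (x.1 : Int) < n / 2 + 1 := by rw [← hd]; exact hx.2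
     omega)

-- ===== PORT B =====
-- one new table entry: the set comprehension over x, X, Y (in that order)
def pvEntry (t : List (List (List Int))) (m : Nat) : List (List Int) :=
  PySem.Set.ofList
    ((List.range' 1 (m / 2)).flatMap (fun x =>
      (t.getD x []).flatMap (fun X =>
        (t.getD (m - x) []).map (fun Y =>
          (PySem.List.sorted (X ++ Y) (fun a => a) false).map (fun a => a + 1)))))

-- the table for sizes 0..n (entry 0 empty, entry 1 = {(0,)}), filled bottom-up
def pvTable (n : Nat) : List (List (List Int)) :=
  (List.range' 2 (n - 1)).foldl (fun t m => t ++ [pvEntry t m]) [[], [[0]]]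

def bruteforce_gen_alt (n : Int) : List (List Int) :=
  if n < 1 then []
  else (pvTable n.toNat).getD n.toNat []

-- ===== PRECONDITION & SPEC =====
-- Pre_ excludes large n: there Python A's recursion chain n -> n-1 -> ... exceeds the
-- interpreter recursion limit and raises RecursionError; the bound is chosen with margin
-- below that limit. A returns no value on any excluded input.
def Pre_bruteforce_gen (n : Int) : Prop := n ≤ 900
instance (n : Int) : Decidable (Pre_bruteforce_gen n) := by unfold Pre_bruteforce_gen; infer_instance
def pvWitness_bruteforce_gen : Int := (6)
def Spec_bruteforce_gen (n : Int) (out : List (List Int)) : Prop := out = bruteforce_gen_alt n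
instance (n : Int) (out : List (List Int)) : Decidable (Spec_bruteforce_gen n out) := by unfold Spec_bruteforce_gen; infer_instance

-- ===== CLAIM (what is proved, stated in full; the proofs are below) =====
def Claim_equal_bruteforce_gen : Prop := ∀ (n : Int), Dom_bruteforce_gen n → Pre_bruteforce_gen n → Spec_bruteforce_gen n (bruteforce_gen n)

-- ===== LEMMAS AND PROOFS =====

-- nested foldl flattens to a foldl over flatMap
theorem pv_foldl_flatMap {α β γ : Type} (l : List α) (g : α → List β)
    (h : γ → β → γ) (init : γ) :
    l.foldl (fun s x => (g x).foldl h s) init = (l.flatMap g).foldl h init := by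
  induction l generalizing init with
  | nil => rfl
  | cons a t ih => simp [List.flatMap_cons, List.foldl_append, ih]

-- the tuple built for a pair (X, Y)
def pvMk (X Y : List Int) : List Int :=
  (PySem.List.sorted (X ++ Y) (fun a => a) false).map (fun a => 1 + a)

theorem bruteforce_gen_nonpos (n : Int) (h : n < 1) : bruteforce_gen n = [] := by
  rw [bruteforce_gen, if_neg (by omega)]
  have hd : PySem.Int.floordiv n 2 = n / 2 :=
    PySem.Int.floordiv_eq_ediv_of_pos (by omega)
  have hnil : PySem.List.pyRange 1 (PySem.Int.floordiv n 2 + 1) 1 = [] := by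
    apply PySem.List.pyRange_one_eq_nil
    rw [hd]; omega
  rw [hnil]
  rfl

theorem bruteforce_gen_one : bruteforce_gen 1 = [[0]] := by
  rw [bruteforce_gen]; rfl

-- A's body, for n ≥ 2, as Set.ofList of the flattened generation list
theorem bruteforce_gen_eq_ofList (n : Int) (hn : 2 ≤ n) :
    bruteforce_gen n =
      PySem.Set.ofList
        ((PySem.List.pyRange 1 (PySem.Int.floordiv n 2 + 1) 1).flatMap (fun x =>
          (bruteforce_gen x).flatMap (fun X =>
            (bruteforce_gen (n - x)).map (fun Y => pvMk X Y)))) := by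
  rw [bruteforce_gen, if_neg (by omega)]
  have hstep : ∀ (s : List (List Int))
      (x : {x // x ∈ PySem.List.pyRange 1 (PySem.Int.floordiv n 2 + 1) 1}),
      (bruteforce_gen x.1).foldl
        (fun s X =>
          (bruteforce_gen (n - x.1)).foldl
            (fun s2 Y =>
              PySem.Set.add s2
                ((PySem.List.sorted (X ++ Y) (fun a => a) false).map (fun a => 1 + a)))
            s)
        s
      = ((bruteforce_gen x.1).flatMap (fun X =>
          (bruteforce_gen (n - x.1)).map (fun Y => pvMk X Y))).foldl PySem.Set.add s := by
    intro s x
    rw [← pv_foldl_flatMap]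
    have hfun :
        (fun (s : List (List Int)) (X : List Int) =>
          (bruteforce_gen (n - x.1)).foldl
            (fun s2 Y =>
              PySem.Set.add s2
                ((PySem.List.sorted (X ++ Y) (fun a => a) false).map (fun a => 1 + a)))
            s)
        = (fun s X =>
            ((bruteforce_gen (n - x.1)).map (fun Y => pvMk X Y)).foldl PySem.Set.add s) := by
      funext s' X
      rw [List.foldl_map]
      rfl
    rw [hfun]
  calc (PySem.List.pyRange 1 (PySem.Int.floordiv n 2 + 1) 1).attach.foldl _ PySem.Set.empty
      = (PySem.List.pyRange 1 (PySem.Int.floordiv n 2 + 1) 1).attach.foldl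
          (fun s x => ((bruteforce_gen x.1).flatMap (fun X =>
            (bruteforce_gen (n - x.1)).map (fun Y => pvMk X Y))).foldl PySem.Set.add s)
          PySem.Set.empty := by
        exact PySem.List.foldl_congr_mem _ _ _ _ (fun acc x _ => hstep acc x)
    _ = (PySem.List.pyRange 1 (PySem.Int.floordiv n 2 + 1) 1).foldl
          (fun s x => ((bruteforce_gen x).flatMap (fun X =>
            (bruteforce_gen (n - x)).map (fun Y => pvMk X Y))).foldl PySem.Set.add s)
          PySem.Set.empty :=
        List.foldl_attach (l := PySem.List.pyRange 1 (PySem.Int.floordiv n 2 + 1) 1)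
          (f := fun s v => ((bruteforce_gen v).flatMap (fun X =>
            (bruteforce_gen (n - v)).map (fun Y => pvMk X Y))).foldl PySem.Set.add s)
          (b := PySem.Set.empty)
    _ = _ := by
        rw [pv_foldl_flatMap, PySem.Set.ofList_eq_foldl]
        rfl

-- length of the growing table
theorem pv_foldl_append_length (l : List Nat) (init : List (List (List Int))) :
    (l.foldl (fun t m => t ++ [pvEntry t m]) init).length = init.length + l.length := by
  induction l generalizing init with
  | nil => rfl
  | cons a t ih => simp [ih]; omega

theorem pvTable_length (n : Nat) (hn : 1 ≤ n) : (pvTable n).length = n + 1 := by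
  unfold pvTable
  rw [pv_foldl_append_length]
  simp; omega

theorem pvTable_succ (n : Nat) (hn : 1 ≤ n) :
    pvTable (n + 1) = pvTable n ++ [pvEntry (pvTable n) (n + 1)] := by
  unfold pvTable
  have h1 : n + 1 - 1 = (n - 1) + 1 := by omega
  rw [h1, List.range'_concat, List.foldl_append]
  have h2 : 2 + 1 * (n - 1) = n + 1 := by omega
  rw [h2]
  rfl

-- main invariant: the table agrees with A on every filled entry
theorem pvTable_getD (n : Nat) (hn : 1 ≤ n) :
    ∀ k ≤ n, (pvTable n).getD k [] = bruteforce_gen (k : Int) := by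
  induction n with
  | zero => omega
  | succ m ih =>
    intro k hk
    by_cases hm : m = 0
    · subst hm
      interval_cases k
      · exact (bruteforce_gen_nonpos 0 (by omega)).symm
      · exact bruteforce_gen_one.symm
    · have hm1 : 1 ≤ m := by omega
      rw [pvTable_succ m hm1]
      rcases Nat.lt_or_ge k (m + 1) with hlt | hge
      · rw [List.getD_append _ _ _ _ (by rw [pvTable_length m hm1]; omega)]
        exact ih hm1 k (by omega)
      · have hkeq : k = m + 1 := by omega
        subst hkeq
        have hidx : (pvTable m ++ [pvEntry (pvTable m) (m + 1)]).getD (m + 1) [] =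
            pvEntry (pvTable m) (m + 1) := by
          have hlen : (pvTable m).length = m + 1 := pvTable_length m hm1
          rw [List.getD_eq_getElem?_getD, List.getElem?_append_right (by omega)]
          simp [hlen]
        rw [hidx]
        -- now show the freshly built entry equals A's value at m+1
        rw [bruteforce_gen_eq_ofList ((m + 1 : Nat) : Int) (by exact_mod_cast Nat.succ_le_succ hm1)]
        unfold pvEntry
        congr 1
        have hfd : PySem.Int.floordiv ((m + 1 : Nat) : Int) 2 = (((m + 1) / 2 : Nat) : Int) := by
          rw [PySem.Int.floordiv_eq_ediv_of_pos (by omega)]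
          omega
        rw [PySem.List.pyRange_one, hfd]
        have htn : ((((m + 1) / 2 : Nat) : Int) + 1 - 1).toNat = (m + 1) / 2 := by omega
        rw [htn, List.range'_eq_map_range, List.flatMap_map, List.flatMap_map]
        apply congrArg List.flatten
        apply List.map_congr_left
        intro j hj
        rw [List.mem_range] at hj
        have hj1 : 1 + j ≤ m := by omega
        have hj2 : m - j ≤ m := by omega
        have e1 : (pvTable m).getD (1 + j) [] = bruteforce_gen ((1 : Int) + (j : Nat)) := by
          have := ih hm1 (1 + j) hj1
          rw [this]; norm_num
        have e2 : (pvTable m).getD (m + 1 - (1 + j)) [] =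
            bruteforce_gen (((m + 1 : Nat) : Int) - ((1 : Int) + (j : Nat))) := by
          have hsub : m + 1 - (1 + j) = m - j := by omega
          have hcast : ((m + 1 : Nat) : Int) - ((1 : Int) + (j : Nat)) = ((m - j : Nat) : Int) := by
            omega
          rw [hsub, hcast]
          exact ih hm1 (m - j) hj2
        rw [e1, e2]
        have hmk : (fun X => (bruteforce_gen (((m + 1 : Nat) : Int) - ((1 : Int) + (j : Nat)))).map
              (fun Y => (PySem.List.sorted (X ++ Y) (fun a => a) false).map (fun a => a + 1)))
            = (fun X => (bruteforce_gen (((m + 1 : Nat) : Int) - ((1 : Int) + (j : Nat)))).map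
              (fun Y => pvMk X Y)) := by
          funext X
          apply List.map_congr_left
          intro Y _
          unfold pvMk
          apply List.map_congr_left
          intro a _
          omega
        rw [hmk]

-- ===== VERDICT (by name: the statement is the Claim_ definition above) =====
theorem bruteforce_gen_spec : Claim_equal_bruteforce_gen := by
  intro n _ _
  unfold Spec_bruteforce_gen bruteforce_gen_alt
  by_cases h1 : n < 1
  · rw [if_pos h1]
    exact bruteforce_gen_nonpos n h1
  · rw [if_neg h1]
    have hk : ((n.toNat : Int)) = n := by omega
    rw [← hk]
    exact (pvTable_getD n.toNat (by omega) n.toNat le_rfl).symm
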